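-- pv_equiv track=rewrite | github.com/AlextheYounga/stock-market-programs | app/lab/rescaledrange/functions.py | exponential_scales
-- ===== SOURCE A (Python) =====
-- def exponential_scales(count, exponent, limit):
--     """
--     The function will create exponential scales, multiplying the denominator by an exponent each loop.
--     The limit param will define how many loops the function runs, for how many scales the user wants.
--
--     (Too complicated, didn't read): The best way to picture what this function is doing: picture an entire stock market graph,
--     and imagine zooming into that graph with a telescope. This function is creating the lenses in which you're viewing that graph.
--     Each scale is a new lens you're adding to that telescope to get a closer look at smaller sections of the graph, and each lens added
--     gives an exponentially microscopic view. Say the first lens lets you view the entire graph, then the second lens lets you view 1/3,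
--     then 1/9, then 1/27, etc.
--
--     Parameters
--     ----------
--     count    :int
--                 total number of items in main list of prices
--     exponent  :int
--                 Exponent for which the scale will be based on. First scale will always be the entirety of the list
--                 Ex: if exponent=3 then scales=[1, 3, 9, 27, 81, 243]
--     limit     :int
--                 *For best results, 5 or 6*
--                 The scales shouldn't go on forever, in general, 5 or 6 is a good number here.
--
--     Returns
--     -------
--     dict
--         Dictionary of scales and number of items inside each scale.
--     """
--     e = exponent
--     itr = []
--     scales = {}
--     for i in range(limit):
--         if (i == 0):
--             scales[i + 1] = count
--             itr.append(i + 1)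
--         else:
--             scales[(itr[i - 1] * e)] = int(count / (itr[i - 1] * e))
--             itr.append(itr[i - 1] * e)
--
--     return scales
-- ===== SOURCE B (Python) =====
-- def exponential_scales(count, exponent, limit):
--     # Each dict entry is computed independently from the loop index by the
--     # closed-form power exponent**i (no running accumulator, no list): the
--     # entries are produced as a staged map over the indices, then assembled
--     # into a dict at the end.
--     def entry(i):
--         if i == 0:
--             return (1, count)
--         p = exponent ** i
--         return (p, int(count / p))
--     return dict(map(entry, range(limit)))
-- ===== Notes on version B (the rewrite author's own statement) =====
-- stated objective: alternative
-- what changed: A maintains a running list itr and multiplies the previous scale by the exponent each iteration; B computes every dict entry independently via the closed-form power exponent**i and assembles the entries with dict(map(...)), keeping no cross-iteration state at all.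
-- outside the precondition, e.g. on exponential_scales(7, 0, 3): A raises ZeroDivisionError, B raises ZeroDivisionError
import Mathlib
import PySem

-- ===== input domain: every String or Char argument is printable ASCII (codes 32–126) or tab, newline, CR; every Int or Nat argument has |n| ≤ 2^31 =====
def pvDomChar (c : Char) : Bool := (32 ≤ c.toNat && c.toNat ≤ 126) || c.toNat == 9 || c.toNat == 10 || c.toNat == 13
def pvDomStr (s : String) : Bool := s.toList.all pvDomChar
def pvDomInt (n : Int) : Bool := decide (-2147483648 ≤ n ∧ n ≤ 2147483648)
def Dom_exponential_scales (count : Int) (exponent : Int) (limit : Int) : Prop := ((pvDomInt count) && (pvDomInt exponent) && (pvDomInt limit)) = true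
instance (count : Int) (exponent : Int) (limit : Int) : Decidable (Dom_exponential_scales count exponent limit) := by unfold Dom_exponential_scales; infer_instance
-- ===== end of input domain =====

-- B keeps no cross-iteration state: each dict entry is computed independently from
-- its index via the closed-form power exponent^i, mapped over the index range and
-- then assembled into the dict; A instead threads a running list itr through the
-- loop. Objective: alternative. Pre_ excludes only inputs where Python A raises
-- ZeroDivisionError (exponent = 0 with limit ≥ 2); B raises there too.


-- ===== PORT A =====
-- int(count / d) is ported as PySem.Int.truncdiv: exact here because |count| ≤ 2^31 < 2^53,
-- so the float division truncates to the exact trunc-quotient for every nonzero divisor.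
-- Python's list itr is represented as an Array Int: .append is .push, itr[i-1]
-- is .getD (i-1).toNat (i ≥ 1 in that branch, and the index is always in range).
def exponential_scales (count : Int) (exponent : Int) (limit : Int) : List (Int × Int) :=
  let e := exponent
  let st := (PySem.List.pyRange 0 limit 1).foldl
    (fun (st : Array Int × PySem.Dict Int Int) i =>
      let itr := st.1
      let scales := st.2
      if i == 0 then
        (itr.push (i + 1), scales.insert (i + 1) count)
      else
        let d := itr.getD (i - 1).toNat 0 * e   -- itr[i-1]; always in range here
        (itr.push d, scales.insert d (PySem.Int.truncdiv count d)))
    (#[], PySem.Dict.empty)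
  st.2.items

-- ===== PORT B =====
-- entry(i): one dict entry from the index alone (exponent ** i is exponent ^ i.toNat;
-- i ≥ 0 throughout the range).
def pvEntry (count : Int) (exponent : Int) (i : Int) : Int × Int :=
  if i == 0 then ((1 : Int), count)
  else
    let p := exponent ^ i.toNat
    (p, PySem.Int.truncdiv count p)

-- dict(map(entry, range(limit))): build the pair list, then insert in order.
def exponential_scales_alt (count : Int) (exponent : Int) (limit : Int) : List (Int × Int) :=
  (((PySem.List.pyRange 0 limit 1).map (pvEntry count exponent)).foldl
    (fun (d : PySem.Dict Int Int) kv => d.insert kv.1 kv.2) PySem.Dict.empty).items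

-- ===== PRECONDITION & SPEC =====
-- Pre_ excludes exactly the inputs where Python A raises ZeroDivisionError:
-- exponent = 0 with at least two loop iterations.
def Pre_exponential_scales (count : Int) (exponent : Int) (limit : Int) : Prop :=
  exponent ≠ 0 ∨ limit ≤ 1
instance (count : Int) (exponent : Int) (limit : Int) : Decidable (Pre_exponential_scales count exponent limit) := by unfold Pre_exponential_scales; infer_instance
def pvWitness_exponential_scales : Int × Int × Int := (100, 3, 5)

def Spec_exponential_scales (count : Int) (exponent : Int) (limit : Int) (out : List (Int × Int)) : Prop := out = exponential_scales_alt count exponent limit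
instance (count : Int) (exponent : Int) (limit : Int) (out : List (Int × Int)) : Decidable (Spec_exponential_scales count exponent limit out) := by unfold Spec_exponential_scales; infer_instance

-- ===== CLAIM =====
def Claim_equal_exponential_scales : Prop := ∀ (count : Int) (exponent : Int) (limit : Int), Dom_exponential_scales count exponent limit → Pre_exponential_scales count exponent limit → Spec_exponential_scales count exponent limit (exponential_scales count exponent limit)

-- ===== LEMMAS AND PROOFS =====

-- Invariant: after n+1 iterations A's itr is the list of powers e^0 … e^n and A's
-- dict equals the dict built by inserting B's first n+1 independent entries in order.
theorem pv_inv (count exponent : Int) (n : Nat) :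
    ((List.range (n + 1)).map (fun (k : Nat) => (k : Int))).foldl
      (fun (st : Array Int × PySem.Dict Int Int) i =>
        let itr := st.1
        let scales := st.2
        if i == 0 then
          (itr.push (i + 1), scales.insert (i + 1) count)
        else
          let d := itr.getD (i - 1).toNat 0 * exponent
          (itr.push d, scales.insert d (PySem.Int.truncdiv count d)))
      (#[], PySem.Dict.empty)
    = (((List.range (n + 1)).map (fun k => exponent ^ k)).toArray,
       (((List.range (n + 1)).map (fun (k : Nat) => pvEntry count exponent (k : Int))).foldl
          (fun (d : PySem.Dict Int Int) kv => d.insert kv.1 kv.2) PySem.Dict.empty)) := by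
  induction n with
  | zero => simp [pvEntry]
  | succ m ih =>
    rw [List.range_succ (n := m + 1), List.map_append, List.foldl_append, ih]
    simp only [List.map_append, List.foldl_append, List.map_cons, List.map_nil,
      List.foldl_cons, List.foldl_nil]
    have hne : (((m + 1 : Nat) : Int) == 0) = false := by
      simp only [beq_eq_false_iff_ne, ne_eq]
      push_cast
      omega
    simp only [hne, Bool.false_eq_true, if_false, pvEntry]
    have hidx : (((List.range (m + 1)).map (fun k => exponent ^ k)).toArray).getD
        ((((m + 1 : Nat) : Int)) - 1).toNat 0 = exponent ^ m := by
      have h1 : ((((m + 1 : Nat) : Int)) - 1).toNat = m := by omega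
      rw [h1]
      simp [Array.getD]
    rw [hidx]
    have htn : ((m + 1 : Nat) : Int).toNat = m + 1 := by omega
    rw [htn]
    simp [pow_succ]

theorem exponential_scales_eq_alt (count exponent limit : Int) :
    exponential_scales count exponent limit = exponential_scales_alt count exponent limit := by
  unfold exponential_scales exponential_scales_alt
  rw [PySem.List.pyRange_one 0 limit]
  simp only [Int.sub_zero]
  by_cases h : limit > 0
  · obtain ⟨m, hm⟩ : ∃ m, limit.toNat = m + 1 := ⟨limit.toNat - 1, by omega⟩
    rw [hm]
    have hz : ∀ k : Nat, ((0 : Int) + k) = (k : Int) := by intro k; ring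
    simp only [hz]
    rw [pv_inv]
    simp [List.map_map, Function.comp_def]
  · have hz : limit.toNat = 0 := by omega
    simp [hz]

-- ===== VERDICT =====
theorem exponential_scales_spec : Claim_equal_exponential_scales := by
  intro count exponent limit _ _
  unfold Spec_exponential_scales
  exact exponential_scales_eq_alt count exponent limit
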